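-- pv_equiv track=rewrite | github.com/sal1717lim/THJ | tp_thj.py | meilleur_reponse
-- ===== SOURCE A (Python) =====
-- def tri_par_joueur(FN,numjoueur,nbstrat):
--     x=[]
--     for i in range(nbstrat):
--         for j in FN:
--            if(j[0][numjoueur]==i):
--                x.append(j)
--     return x
--
-- def aranger_le_jeu(FN, numero_joueur=1, nombrejoueur=3, nombre_strat=3):
--     for i in range(1, nombrejoueur + 1):
--         if i != numero_joueur:
--             FN = tri_par_joueur(FN, i, nombre_strat)
--
--     return FN
--
-- def meilleur_reponse(FN, numero_joueur=1, nombrejoueur=3, nombre_strat=3):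
--     FN = aranger_le_jeu(FN, numero_joueur=numero_joueur, nombrejoueur=nombrejoueur, nombre_strat=nombre_strat)
--     meilleur_reponse = []
--     i = 0
--     while i < len(FN):
--         max = None
--         for j in range(nombre_strat):
--             if max == None:
--                 max = FN[i + j]
--             else:
--                 if FN[i + j][1][numero_joueur - 1] > max[1][numero_joueur - 1]:
--                     max = FN[i + j]
--         meilleur_reponse.append(max)
--         i += nombre_strat
--     return meilleur_reponse
-- ===== SOURCE B (Python) =====
-- def meilleur_reponse(FN, numero_joueur=1, nombrejoueur=3, nombre_strat=3):
--     # Single mixed-radix bucketing pass (one dict-group over the rows) plus one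
--     # sort of the bucket codes, instead of A's counting pass per other player;
--     # then a first-max scan of each chunk of nombre_strat rows.
--     others = [i for i in range(1, nombrejoueur + 1) if i != numero_joueur]
--     rows = [p for p in FN
--             if all(i < len(p[0]) and 0 <= p[0][i] < nombre_strat for i in others)]
--     buckets = {}
--     for p in rows:
--         c = 0
--         w = 1
--         for i in others:
--             c += p[0][i] * w
--             w *= nombre_strat
--         buckets.setdefault(c, []).append(p)
--     ordered = [p for c in sorted(buckets) for p in buckets[c]]
--     out = []
--     while ordered:
--         chunk, ordered = ordered[:nombre_strat], ordered[nombre_strat:]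
--         best = chunk[0]
--         for p in chunk[1:]:
--             if p[1][numero_joueur - 1] > best[1][numero_joueur - 1]:
--                 best = p
--         out.append(best)
--     return out
-- ===== Notes on version B (the rewrite author's own statement) =====
-- stated objective: faster
-- what changed: A arranges the payoff table with one counting pass (a scan per strategy value) per other player and then scans chunks with a None-seeded running max; B makes a single pass computing a mixed-radix bucket code per row, groups rows in a dict, concatenates buckets in sorted-code order, and takes each chunk's first-max with one seeded scan, replacing A's O(nombrejoueur*nombre_strat*n) passes by O(nombrejoueur*n + n log n).
import Mathlib
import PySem

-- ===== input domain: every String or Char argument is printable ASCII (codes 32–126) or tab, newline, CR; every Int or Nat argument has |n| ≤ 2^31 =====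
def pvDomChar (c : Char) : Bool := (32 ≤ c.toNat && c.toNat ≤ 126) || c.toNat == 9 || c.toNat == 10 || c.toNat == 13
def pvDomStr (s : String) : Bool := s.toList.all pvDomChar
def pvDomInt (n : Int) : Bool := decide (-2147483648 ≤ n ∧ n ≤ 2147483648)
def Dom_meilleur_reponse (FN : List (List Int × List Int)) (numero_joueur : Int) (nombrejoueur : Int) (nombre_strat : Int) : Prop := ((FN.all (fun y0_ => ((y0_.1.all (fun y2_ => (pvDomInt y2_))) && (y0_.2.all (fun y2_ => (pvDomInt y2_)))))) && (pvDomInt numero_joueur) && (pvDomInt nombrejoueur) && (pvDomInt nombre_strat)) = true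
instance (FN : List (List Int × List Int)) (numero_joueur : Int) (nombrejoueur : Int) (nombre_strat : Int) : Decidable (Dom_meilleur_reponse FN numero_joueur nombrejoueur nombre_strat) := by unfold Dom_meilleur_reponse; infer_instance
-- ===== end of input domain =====

-- One honest line: B replaces A's per-player counting passes over the payoff table by a single
-- mixed-radix bucketing pass plus one sort of the bucket codes, then a first-max scan per chunk;
-- neither mutates its arguments, the equivalence is about return values.

-- ===== PORT A =====
-- tri_par_joueur: for i in range(nbstrat): for j in FN: if j[0][numjoueur]==i: x.append(j)
-- Python's j[0][numjoueur] raises IndexError out of range; Pre_ excludes every input on which that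
-- access is reached out of range, so the pyGetD default (-1, never equal to any i in range(nbstrat))
-- is never consulted on admitted inputs.
def tri_par_joueur (FN : List (List Int × List Int)) (numjoueur : Int) (nbstrat : Int) : List (List Int × List Int) :=
  (PySem.List.pyRange 0 nbstrat 1).foldl
    (fun x i =>
      FN.foldl (fun x j => if PySem.List.pyGetD j.1 numjoueur (-1) == i then x ++ [j] else x) x)
    []

def aranger_le_jeu (FN : List (List Int × List Int)) (numero_joueur nombrejoueur nombre_strat : Int) : List (List Int × List Int) :=
  (PySem.List.pyRange 1 (nombrejoueur + 1) 1).foldl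
    (fun fn i => if i ≠ numero_joueur then tri_par_joueur fn i nombre_strat else fn) FN

-- one step of A's inner 'for j in range(nombre_strat)' loop (max == None / strict-> replacement)
def pvMaxStep (nj : Int) (acc : Option (List Int × List Int)) (e : List Int × List Int) : Option (List Int × List Int) :=
  match acc with
  | none => some e
  | some m => if PySem.List.pyGetD e.2 (nj - 1) 0 > PySem.List.pyGetD m.2 (nj - 1) 0 then some e else some m

-- A's 'while i < len(FN)' loop, rebased on the suffix FN[i:] (FN[i+j] = FN[i:][j]).
-- Python diverges when nombre_strat ≤ 0 and the list is nonempty; the guard only makes the port total.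
def pvBestLoop (l : List (List Int × List Int)) (nj ns : Int) : List (List Int × List Int) :=
  if h : l = [] then []
  else if hns : ns ≤ 0 then []
  else
    match (PySem.List.pyRange 0 ns 1).foldl
        (fun acc j => pvMaxStep nj acc (PySem.List.pyGetD l j ([], []))) none with
    | some m => m :: pvBestLoop (l.drop ns.toNat) nj ns
    | none => pvBestLoop (l.drop ns.toNat) nj ns
termination_by l.length
decreasing_by
  all_goals
    have h0 : l.length ≠ 0 := fun hc => h (List.eq_nil_of_length_eq_zero hc)
    simp only [List.length_drop]; omega

def meilleur_reponse (FN : List (List Int × List Int)) (numero_joueur : Int) (nombrejoueur : Int) (nombre_strat : Int) : List (List Int × List Int) :=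
  pvBestLoop (aranger_le_jeu FN numero_joueur nombrejoueur nombre_strat) numero_joueur nombre_strat

-- ===== PORT B =====
-- others = [i for i in range(1, nombrejoueur+1) if i != numero_joueur]
def pvOthers (nj np : Int) : List Int := (PySem.List.pyRange 1 (np + 1) 1).filter (fun i => i != nj)

-- i < len(p[0]) and 0 <= p[0][i] < nombre_strat  (one conjunct of Source B's `all`; the access p[0][i]
-- happens only under the length guard, so pyGetD's default is never consulted for the i ≥ 1 that occur)
def pvInR (ns i : Int) (p : List Int × List Int) : Bool :=
  decide (i < (p.1.length : Int) ∧ 0 ≤ PySem.List.pyGetD p.1 i (-1) ∧ PySem.List.pyGetD p.1 i (-1) < ns)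

def pvKeep (nj np ns : Int) (p : List Int × List Int) : Bool :=
  (pvOthers nj np).all (fun i => pvInR ns i p)

-- the (c, w) accumulator loop of Source B (p[0][i] is in range for kept rows; same default as the guard)
def pvCode (others : List Int) (ns : Int) (p : List Int × List Int) : Int :=
  (others.foldl (fun cw i => (cw.1 + PySem.List.pyGetD p.1 i (-1) * cw.2, cw.2 * ns)) ((0 : Int), (1 : Int))).1

-- Source B's per-chunk 'best = chunk[0]; for p in chunk[1:]: if … best = p' scan
def pvBestOf (nj : Int) (best p : List Int × List Int) : List Int × List Int :=
  if PySem.List.pyGetD p.2 (nj - 1) 0 > PySem.List.pyGetD best.2 (nj - 1) 0 then p else best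

-- Source B's chunking 'while ordered' loop (same divergence guard remark as for pvBestLoop)
def pvChunkLoop (l : List (List Int × List Int)) (nj ns : Int) : List (List Int × List Int) :=
  if h : l = [] then []
  else if hns : ns ≤ 0 then []
  else
    match PySem.List.slice l none (some ns) with
    | [] => []
    | c0 :: rest => (rest.foldl (pvBestOf nj) c0) :: pvChunkLoop (PySem.List.slice l (some ns) none) nj ns
termination_by l.length
decreasing_by
  all_goals
    have h0 : l.length ≠ 0 := fun hc => h (List.eq_nil_of_length_eq_zero hc)
    rw [PySem.List.slice_from l (by omega : (0:Int) ≤ ns)]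
    simp only [List.length_drop]; omega

def meilleur_reponse_alt (FN : List (List Int × List Int)) (numero_joueur : Int) (nombrejoueur : Int) (nombre_strat : Int) : List (List Int × List Int) :=
  let others := pvOthers numero_joueur nombrejoueur
  let rows := FN.filter (pvKeep numero_joueur nombrejoueur nombre_strat)
  let d := (rows.map (fun p => (pvCode others nombre_strat p, p))).foldl
      (fun d q => d.modify q.1 [] (fun l => l ++ [q.2])) PySem.Dict.empty
  let ordered := (PySem.List.sorted d.keys (fun c => c) false).flatMap (fun c => d.getD c [])
  pvChunkLoop ordered numero_joueur nombre_strat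

-- ===== PRECONDITION & SPEC =====
-- cheap (per-row bounded) restatements of conditions on the huge range 1..nombrejoueur, so that
-- Pre_ is decidable by direct evaluation even for large nombrejoueur
-- the other players' indices up to a per-row cutoff b (only indices below len(p[0])+3 matter)
def pvOthB (nj b : Int) : List Int := (PySem.List.pyRange 1 b 1).filter (fun i => i != nj)

-- pvKeep, decided without enumerating 1..nombrejoueur (proved equal to pvKeep below)
def pvKeepB (nj np ns : Int) (p : List Int × List Int) : Bool :=
  decide (np < max 1 (p.1.length : Int) ∨ (np = max 1 (p.1.length : Int) ∧ nj = np)) &&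
  (pvOthB nj (min (np + 1) (p.1.length : Int))).all (fun i => pvInR ns i p)

-- Pre_ excludes exactly the inputs where Python A does not return normally: where it diverges
-- (nombre_strat ≤ 0 with no other player and a nonempty table), where a sorting pass raises
-- IndexError (a row that survived every earlier pass is too short for the current other player's
-- index), and where the best-response loop raises IndexError (nombre_strat not dividing the number
-- of surviving rows, or — only probed when nombre_strat ≥ 2 — a surviving row whose payoff list has
-- no entry at index numero_joueur - 1). On every other input A returns and B matches it.
def Pre_meilleur_reponse (FN : List (List Int × List Int)) (numero_joueur : Int) (nombrejoueur : Int) (nombre_strat : Int) : Prop :=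
  (nombre_strat ≤ 0 → ((1 ≤ nombrejoueur ∧ (2 ≤ nombrejoueur ∨ numero_joueur ≠ 1)) ∨ FN = [])) ∧
  (1 ≤ nombre_strat →
    (∀ p ∈ FN, ∀ i ∈ pvOthB numero_joueur (min (nombrejoueur + 1) ((p.1.length : Int) + 3)),
        (∀ j ∈ pvOthB numero_joueur (min (nombrejoueur + 1) ((p.1.length : Int) + 3)),
            j < i → pvInR nombre_strat j p = true) →
        i < (p.1.length : Int)) ∧
    (2 ≤ nombre_strat → ∀ p ∈ FN, pvKeepB numero_joueur nombrejoueur nombre_strat p = true →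
        PySem.Raise.InRange p.2.length (numero_joueur - 1)) ∧
    (nombre_strat ∣ ((FN.filter (pvKeepB numero_joueur nombrejoueur nombre_strat)).length : Int)))

instance (FN : List (List Int × List Int)) (numero_joueur : Int) (nombrejoueur : Int) (nombre_strat : Int) : Decidable (Pre_meilleur_reponse FN numero_joueur nombrejoueur nombre_strat) := by
  unfold Pre_meilleur_reponse; infer_instance

def pvWitness_meilleur_reponse : (List (List Int × List Int)) × Int × Int × Int :=
  ([([0, 0, 0], [5]), ([0, 0, 1], [7])], 1, 2, 2)

def Spec_meilleur_reponse (FN : List (List Int × List Int)) (numero_joueur : Int) (nombrejoueur : Int) (nombre_strat : Int) (out : List (List Int × List Int)) : Prop := out = meilleur_reponse_alt FN numero_joueur nombrejoueur nombre_strat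
instance (FN : List (List Int × List Int)) (numero_joueur : Int) (nombrejoueur : Int) (nombre_strat : Int) (out : List (List Int × List Int)) : Decidable (Spec_meilleur_reponse FN numero_joueur nombrejoueur nombre_strat out) := by unfold Spec_meilleur_reponse; infer_instance

-- ===== CLAIM (what is proved, stated in full; the proofs are below) =====
def Claim_equal_meilleur_reponse : Prop := ∀ (FN : List (List Int × List Int)) (numero_joueur : Int) (nombrejoueur : Int) (nombre_strat : Int), Dom_meilleur_reponse FN numero_joueur nombrejoueur nombre_strat → Pre_meilleur_reponse FN numero_joueur nombrejoueur nombre_strat → Spec_meilleur_reponse FN numero_joueur nombrejoueur nombre_strat (meilleur_reponse FN numero_joueur nombrejoueur nombre_strat)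

-- ===== LEMMAS AND PROOFS =====

-- for 0 ≤ i the length guard in pvInR is subsumed by the value test against the default -1
theorem pvInR_eq (ns i : Int) (p : List Int × List Int) (hi : 0 ≤ i) :
    pvInR ns i p
      = decide (0 ≤ PySem.List.pyGetD p.1 i (-1) ∧ PySem.List.pyGetD p.1 i (-1) < ns) := by
  unfold pvInR
  by_cases hlen : i < (p.1.length : Int)
  · simp [hlen]
  · have hd : PySem.List.pyGetD p.1 i (-1) = -1 := by
      rw [PySem.List.pyGetD_of_nonneg p.1 (-1) hi, List.getD, List.getElem?_eq_none (by omega)]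
      rfl
    simp [hlen, hd]

theorem pvInR_lt_len (ns i : Int) (p : List Int × List Int) (h : pvInR ns i p = true) :
    i < (p.1.length : Int) := (of_decide_eq_true h).1

theorem pv_othB_mem (nj b i : Int) : i ∈ pvOthB nj b ↔ 1 ≤ i ∧ i < b ∧ i ≠ nj := by
  unfold pvOthB
  rw [List.mem_filter, PySem.List.mem_pyRange_one]
  simp only [bne_iff_ne, ne_eq]
  tauto

theorem pv_others_mem (nj np i : Int) : i ∈ pvOthers nj np ↔ 1 ≤ i ∧ i ≤ np ∧ i ≠ nj := by
  unfold pvOthers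
  rw [List.mem_filter, PySem.List.mem_pyRange_one]
  simp only [bne_iff_ne, ne_eq]
  constructor
  · rintro ⟨⟨h1, h2⟩, h3⟩; exact ⟨h1, by omega, h3⟩
  · rintro ⟨h1, h2, h3⟩; exact ⟨⟨h1, by omega⟩, h3⟩

theorem pv_keep_iff (nj np ns : Int) (p : List Int × List Int) :
    (pvKeep nj np ns p = true) ↔ ∀ i : Int, 1 ≤ i → i ≤ np → i ≠ nj → pvInR ns i p = true := by
  unfold pvKeep
  rw [List.all_eq_true]
  constructor
  · intro h i h1 h2 h3
    exact h i ((pv_others_mem nj np i).mpr ⟨h1, h2, h3⟩)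
  · intro h i hi
    obtain ⟨h1, h2, h3⟩ := (pv_others_mem nj np i).mp hi
    exact h i h1 h2 h3

theorem pv_keepB_eq (nj np ns : Int) (p : List Int × List Int) :
    pvKeepB nj np ns p = pvKeep nj np ns p := by
  rw [Bool.eq_iff_iff, pv_keep_iff]
  unfold pvKeepB
  rw [Bool.and_eq_true, List.all_eq_true]
  constructor
  · rintro ⟨hA, hB⟩ i h1 h2 h3
    have hA' := of_decide_eq_true hA
    have hiL : i < (p.1.length : Int) := by omega
    exact hB i ((pv_othB_mem nj _ i).mpr ⟨h1, by omega, h3⟩)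
  · intro h
    refine ⟨decide_eq_true ?_, ?_⟩
    · by_cases hlt : np < max 1 (p.1.length : Int)
      · left; exact hlt
      · right
        have hnj : nj = max 1 (p.1.length : Int) := by
          by_contra hne
          have hin := h (max 1 (p.1.length : Int)) (by omega) (by omega)
            (fun hc => hne hc.symm)
          have := pvInR_lt_len _ _ _ hin
          omega
        have hnp : np = max 1 (p.1.length : Int) := by
          by_contra hne
          have hin := h (max 1 (p.1.length : Int) + 1) (by omega) (by omega) (by omega)
          have := pvInR_lt_len _ _ _ hin
          omega
        exact ⟨hnp, by omega⟩
    · intro i hi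
      obtain ⟨h1, h2, h3⟩ := (pv_othB_mem nj _ i).mp hi
      exact h i h1 (by omega) h3

-- abbreviations used only by the proofs
def pvByCode (l : List (List Int × List Int)) (f : List Int × List Int → Int) (N : Int) : List (List Int × List Int) :=
  (PySem.List.pyRange 0 N 1).flatMap (fun c => l.filter (fun p => f p == c))

def pvPasses (os : List Int) (ns : Int) (FN : List (List Int × List Int)) : List (List Int × List Int) :=
  os.foldl (fun l i => tri_par_joueur l i ns) FN

theorem pv_tri_eq_flatMap (FN : List (List Int × List Int)) (i ns : Int) :
    tri_par_joueur FN i ns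
      = (PySem.List.pyRange 0 ns 1).flatMap (fun v => FN.filter (fun j => PySem.List.pyGetD j.1 i (-1) == v)) := by
  unfold tri_par_joueur
  have h : (fun (x : List (List Int × List Int)) (v : Int) =>
      FN.foldl (fun x j => if PySem.List.pyGetD j.1 i (-1) == v then x ++ [j] else x) x)
      = fun x v => x ++ FN.filter (fun j => PySem.List.pyGetD j.1 i (-1) == v) := by
    funext x v; exact PySem.List.foldl_append_if_eq_filter _ _ _
  rw [h, PySem.List.foldl_append_eq_flatMap]
  simp

theorem pv_tri_nil (i ns : Int) : tri_par_joueur [] i ns = [] := by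
  simp [pv_tri_eq_flatMap]

theorem pv_range_mul_flatMap (N : Int) (hN : 0 ≤ N) :
    ∀ s : Int, 0 ≤ s →
      PySem.List.pyRange 0 (N * s) 1
        = (PySem.List.pyRange 0 s 1).flatMap (fun v => PySem.List.pyRange (N * v) (N * v + N) 1) := by
  intro s hs
  induction s, hs using Int.le_induction with
  | base => simp [PySem.List.pyRange_one_eq_nil]
  | succ s hs ih =>
    have h1 : PySem.List.pyRange 0 (s + 1) 1 = PySem.List.pyRange 0 s 1 ++ [s] :=
      PySem.List.pyRange_one_succ_right hs
    have h2 : PySem.List.pyRange 0 (N * (s + 1)) 1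
        = PySem.List.pyRange 0 (N * s) 1 ++ PySem.List.pyRange (N * s) (N * s + N) 1 := by
      have := PySem.List.pyRange_one_append 0 (N * s) (N * (s + 1))
        (by positivity) (by nlinarith)
      rw [this]; ring_nf
    rw [h2, h1, List.flatMap_append, ih]
    simp

theorem pv_range_shift (a N : Int) :
    PySem.List.pyRange a (a + N) 1 = (PySem.List.pyRange 0 N 1).map (fun c => a + c) := by
  rw [PySem.List.pyRange_one a (a + N), PySem.List.pyRange_one 0 N]
  simp [List.map_map, Function.comp]

theorem pv_split_iff (f k N v c ns : Int) (hf0 : 0 ≤ f) (hfN : f < N)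
    (hc0 : 0 ≤ c) (hcN : c < N) (hv0 : 0 ≤ v) (hvs : v < ns) :
    (k = v ∧ f = c) ↔ ((0 ≤ k ∧ k < ns) ∧ f + N * k = N * v + c) := by
  constructor
  · rintro ⟨rfl, rfl⟩
    exact ⟨⟨hv0, hvs⟩, by ring⟩
  · rintro ⟨_, heq⟩
    have h1 : N * (k - v) = N * k - N * v := by ring
    rcases lt_trichotomy k v with h | h | h
    · exfalso
      have h2 : N * (k - v) ≤ N * (-1) := mul_le_mul_of_nonneg_left (by omega) (by omega)
      have h3 : N * (-1) = -N := by ring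
      omega
    · subst h; omega
    · exfalso
      have h2 : N * 1 ≤ N * (k - v) := mul_le_mul_of_nonneg_left (by omega) (by omega)
      have h3 : N * 1 = N := by ring
      omega

theorem pv_pass_byCode (m : List (List Int × List Int)) (f : List Int × List Int → Int)
    (N i ns : Int) (hN : 1 ≤ N) (hns : 1 ≤ ns) (hi : 0 ≤ i)
    (hb : ∀ p ∈ m, 0 ≤ f p ∧ f p < N) :
    tri_par_joueur (pvByCode m f N) i ns
      = pvByCode (m.filter (pvInR ns i))
          (fun p => f p + N * PySem.List.pyGetD p.1 i (-1)) (N * ns) := by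
  rw [pv_tri_eq_flatMap]
  unfold pvByCode
  rw [pv_range_mul_flatMap N (by omega) ns (by omega), List.flatMap_assoc]
  apply List.flatMap_congr
  intro v hv
  obtain ⟨hv0, hvs⟩ := PySem.List.mem_pyRange_one.mp hv
  rw [List.filter_flatMap, pv_range_shift (N * v) N, List.flatMap_map]
  apply List.flatMap_congr
  intro c hc
  obtain ⟨hc0, hcN⟩ := PySem.List.mem_pyRange_one.mp hc
  rw [List.filter_filter, List.filter_filter]
  apply List.filter_congr
  intro p hp
  obtain ⟨hf0, hfN⟩ := hb p hp
  have hiff := pv_split_iff (f p) (PySem.List.pyGetD p.1 i (-1)) N v c ns hf0 hfN hc0 hcN hv0 hvs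
  rw [Bool.eq_iff_iff]
  rw [pvInR_eq ns i p hi]
  simp only [Bool.and_eq_true, beq_iff_eq, decide_eq_true_eq]
  constructor
  · rintro ⟨h1, h2⟩
    obtain ⟨hk, heq⟩ := hiff.mp ⟨h1, h2⟩
    exact ⟨by omega, hk⟩
  · rintro ⟨heq, hk⟩
    exact hiff.mpr ⟨hk, by omega⟩

theorem pv_code_foldl_general (ns : Int) (p : List Int × List Int) :
    ∀ (os : List Int) (c w : Int),
      os.foldl (fun cw i => (cw.1 + PySem.List.pyGetD p.1 i (-1) * cw.2, cw.2 * ns)) (c, w)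
        = (c + w * pvCode os ns p, w * ns ^ os.length) := by
  intro os
  induction os with
  | nil => intro c w; simp [pvCode]
  | cons i os ih =>
    intro c w
    have h1 : pvCode (i :: os) ns p = PySem.List.pyGetD p.1 i (-1) + ns * pvCode os ns p := by
      simp only [pvCode, List.foldl_cons]
      rw [ih, ih]
      simp only []
      ring
    simp only [List.foldl_cons]
    rw [ih, h1, List.length_cons, Prod.mk.injEq]
    constructor <;> ring

theorem pv_code_snoc (os : List Int) (i ns : Int) (p : List Int × List Int) :
    pvCode (os ++ [i]) ns p = pvCode os ns p + ns ^ os.length * PySem.List.pyGetD p.1 i (-1) := by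
  conv_lhs => unfold pvCode
  rw [List.foldl_append, pv_code_foldl_general ns p os 0 1]
  simp [List.foldl_cons]
  ring

theorem pv_code_bound (ns : Int) (hns : 1 ≤ ns) (p : List Int × List Int) :
    ∀ os : List Int, (∀ i ∈ os, 0 ≤ i) → os.all (fun i => pvInR ns i p) = true →
      0 ≤ pvCode os ns p ∧ pvCode os ns p < ns ^ os.length := by
  intro os
  induction os using List.reverseRecOn with
  | nil => intro _ _; simp [pvCode]
  | append_singleton os i ih =>
    intro hpos h
    rw [List.all_append] at h
    simp only [List.all_cons, List.all_nil, Bool.and_eq_true] at h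
    have h2 := ih (fun j hj => hpos j (List.mem_append_left _ hj)) h.1
    have hi0 : 0 ≤ i := hpos i (List.mem_append_right _ List.mem_cons_self)
    have h3 : 0 ≤ PySem.List.pyGetD p.1 i (-1) ∧ PySem.List.pyGetD p.1 i (-1) < ns := by
      have := h.2.1
      rw [pvInR_eq ns i p hi0] at this
      simpa using this
    have hNpos : (0:Int) < ns ^ os.length := by positivity
    have hk : ns ^ os.length * PySem.List.pyGetD p.1 i (-1) ≤ ns ^ os.length * (ns - 1) :=
      mul_le_mul_of_nonneg_left (by omega) (le_of_lt hNpos)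
    have hk2 : ns ^ os.length * PySem.List.pyGetD p.1 i (-1)
        ≤ ns ^ os.length * ns - ns ^ os.length := by
      have h' : ns ^ os.length * (ns - 1) = ns ^ os.length * ns - ns ^ os.length := by ring
      omega
    have hk0 : 0 ≤ ns ^ os.length * PySem.List.pyGetD p.1 i (-1) :=
      mul_nonneg (le_of_lt hNpos) h3.1
    have hpow : ns ^ ((os ++ [i]).length) = ns ^ os.length * ns := by
      rw [List.length_append, List.length_cons, List.length_nil, pow_succ]
    rw [pv_code_snoc, hpow]
    omega

theorem pv_passes_byCode (ns : Int) (hns : 1 ≤ ns) (FN : List (List Int × List Int)) :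
    ∀ os : List Int, (∀ i ∈ os, 0 ≤ i) →
      pvPasses os ns FN
        = pvByCode (FN.filter (fun p => os.all (fun i => pvInR ns i p))) (pvCode os ns) (ns ^ os.length) := by
  intro os
  induction os using List.reverseRecOn with
  | nil =>
    intro _
    unfold pvPasses pvByCode
    simp only [List.foldl_nil, List.length_nil, pow_zero]
    have h0 : PySem.List.pyRange 0 1 1 = [0] := by decide
    rw [h0, List.flatMap_cons, List.flatMap_nil, List.append_nil]
    have h1 : (fun p : List Int × List Int => pvCode ([] : List Int) ns p == (0:Int))
        = fun _ => true := by
      funext p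
      show (((List.foldl _ ((0:Int), (1:Int)) []).1 : Int) == 0) = true
      rw [List.foldl_nil]
      rfl
    have h2 : (fun p : List Int × List Int => List.all [] (fun i => pvInR ns i p))
        = fun _ => true := by
      funext p; rfl
    rw [h1, h2, List.filter_true, List.filter_true]
  | append_singleton os i ih =>
    intro hpos
    have hpos' : ∀ j ∈ os, 0 ≤ j := fun j hj => hpos j (List.mem_append_left _ hj)
    have hi0 : 0 ≤ i := hpos i (List.mem_append_right _ List.mem_cons_self)
    have hstep : pvPasses (os ++ [i]) ns FN = tri_par_joueur (pvPasses os ns FN) i ns := by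
      unfold pvPasses
      rw [List.foldl_append, List.foldl_cons, List.foldl_nil]
    rw [hstep, ih hpos']
    rw [pv_pass_byCode _ _ _ i ns (one_le_pow₀ hns) hns hi0
      (fun p hp => pv_code_bound ns hns p os hpos' (List.mem_filter.mp hp).2)]
    have e1 : (FN.filter (fun p => os.all (fun j => pvInR ns j p))).filter (pvInR ns i)
        = FN.filter (fun p => (os ++ [i]).all (fun j => pvInR ns j p)) := by
      rw [List.filter_filter]
      apply List.filter_congr
      intro p _
      simp [List.all_append, Bool.and_comm]
    have e2 : (fun p => pvCode os ns p + ns ^ os.length * PySem.List.pyGetD p.1 i (-1))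
        = pvCode (os ++ [i]) ns := by
      funext p; rw [pv_code_snoc]
    have e3 : ns ^ os.length * ns = ns ^ (os ++ [i]).length := by
      rw [List.length_append, List.length_cons, List.length_nil, pow_succ]
    rw [e1, e2, e3]

theorem pv_arranged_eq (FN : List (List Int × List Int)) (nj np ns : Int) :
    aranger_le_jeu FN nj np ns = pvPasses (pvOthers nj np) ns FN := by
  unfold aranger_le_jeu pvPasses pvOthers
  rw [PySem.List.foldl_ite_eq_foldl_filter (p := fun i => i ≠ nj)
    (f := fun fn i => tri_par_joueur fn i ns)]
  congr 1
  apply List.filter_congr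
  intro i _
  by_cases h : i = nj <;> simp [h]

theorem pv_others_nonneg (nj np : Int) : ∀ i ∈ pvOthers nj np, 0 ≤ i := by
  intro i hi
  obtain ⟨h1, _⟩ := List.mem_filter.mp hi
  have := (PySem.List.mem_pyRange_one.mp h1).1
  omega

theorem pv_bucket_getD (rows : List (List Int × List Int)) (others : List Int) (ns c : Int) :
    ((rows.map (fun p => (pvCode others ns p, p))).foldl
        (fun d q => d.modify q.1 [] (fun l => l ++ [q.2])) PySem.Dict.empty).getD c []
      = rows.filter (fun p => pvCode others ns p == c) := by
  rw [PySem.Dict.getD_foldl_modify_append, PySem.Dict.getD_empty]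
  rw [List.filter_map]
  simp [Function.comp_def]

theorem pv_bucket_keys (rows : List (List Int × List Int)) (others : List Int) (ns : Int) :
    ((rows.map (fun p => (pvCode others ns p, p))).foldl
        (fun d q => d.modify q.1 [] (fun l => l ++ [q.2])) PySem.Dict.empty).keys
      = PySem.Set.ofList (rows.map (fun p => pvCode others ns p)) := by
  have h1 : ((rows.map (fun p => (pvCode others ns p, p))).foldl
        (fun d q => d.modify q.1 [] (fun l => l ++ [q.2])) PySem.Dict.empty).keys
      = PySem.Set.update PySem.Dict.empty.keys
          ((rows.map (fun p => (pvCode others ns p, p))).map (fun q => q.1)) :=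
    PySem.Dict.keys_foldl_modify_key _ (fun q : Int × (List Int × List Int) => q.1) []
      (fun _ (q : Int × (List Int × List Int)) l => l ++ [q.2]) _
  rw [h1, PySem.Dict.keys_empty, PySem.Set.update_nil_left, List.map_map]
  simp [Function.comp_def]

theorem pv_flatMap_eq_of_sorted (g : Int → List (List Int × List Int)) (s t : List Int)
    (hs1 : s.Pairwise (· ≤ ·)) (ht1 : t.Pairwise (· ≤ ·)) (hs2 : s.Nodup) (ht2 : t.Nodup)
    (hmem : ∀ c, g c ≠ [] → (c ∈ s ∧ c ∈ t)) : s.flatMap g = t.flatMap g := by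
  have key : ∀ u : List Int, u.flatMap g = (u.filter (fun c => !(g c).isEmpty)).flatMap g := by
    intro u
    induction u with
    | nil => rfl
    | cons c u ih =>
      rw [List.flatMap_cons, List.filter_cons]
      by_cases h : g c = []
      · simp [h, ih]
      · have hb : (!(g c).isEmpty) = true := by simpa [List.isEmpty_iff] using h
        rw [hb, if_pos rfl, List.flatMap_cons, ih]
  rw [key s, key t]
  have hset : s.filter (fun c => !(g c).isEmpty) = t.filter (fun c => !(g c).isEmpty) := by
    apply PySem.List.eq_of_perm_of_pairwise_le_of_injective (fun c : Int => c)
      (fun a b h => h)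
    · rw [List.perm_ext_iff_of_nodup (hs2.filter _) (ht2.filter _)]
      intro c
      rw [List.mem_filter, List.mem_filter]
      constructor
      · rintro ⟨_, h2⟩
        have hne : g c ≠ [] := by simpa [List.isEmpty_iff] using h2
        exact ⟨(hmem c hne).2, h2⟩
      · rintro ⟨_, h2⟩
        have hne : g c ≠ [] := by simpa [List.isEmpty_iff] using h2
        exact ⟨(hmem c hne).1, h2⟩
    · exact List.Pairwise.sublist List.filter_sublist hs1
    · exact List.Pairwise.sublist List.filter_sublist ht1
  rw [hset]

-- A's passes permute the kept rows (every kept row lands in exactly one code bucket)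
theorem pv_byCode_perm (f : List Int × List Int → Int) (N : Int) :
    ∀ l : List (List Int × List Int), (∀ p ∈ l, 0 ≤ f p ∧ f p < N) → (pvByCode l f N).Perm l := by
  intro l
  induction l with
  | nil => intro _; simp [pvByCode]
  | cons p l ih =>
    intro hb
    obtain ⟨hp0, hpN⟩ := hb p (List.mem_cons_self)
    have hsplit : PySem.List.pyRange 0 N 1
        = PySem.List.pyRange 0 (f p) 1 ++ PySem.List.pyRange (f p) N 1 :=
      PySem.List.pyRange_one_append 0 (f p) N hp0 (le_of_lt hpN)
    have hsplit2 : PySem.List.pyRange (f p) N 1 = f p :: PySem.List.pyRange (f p + 1) N 1 :=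
      PySem.List.pyRange_one_cons hpN
    have hlow : (PySem.List.pyRange 0 (f p) 1).flatMap (fun c => (p :: l).filter (fun q => f q == c))
        = (PySem.List.pyRange 0 (f p) 1).flatMap (fun c => l.filter (fun q => f q == c)) := by
      apply List.flatMap_congr
      intro c hc
      have h2 := (PySem.List.mem_pyRange_one.mp hc).2
      rw [List.filter_cons]
      have hne : (f p == c) = false := by simp; omega
      rw [hne]; simp
    have hhigh : (PySem.List.pyRange (f p + 1) N 1).flatMap (fun c => (p :: l).filter (fun q => f q == c))
        = (PySem.List.pyRange (f p + 1) N 1).flatMap (fun c => l.filter (fun q => f q == c)) := by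
      apply List.flatMap_congr
      intro c hc
      have h2 := (PySem.List.mem_pyRange_one.mp hc).1
      rw [List.filter_cons]
      have hne : (f p == c) = false := by simp; omega
      rw [hne]; simp
    have hmid : (p :: l).filter (fun q => f q == f p) = p :: l.filter (fun q => f q == f p) := by
      rw [List.filter_cons]; simp
    have hshape : pvByCode (p :: l) f N
        = (PySem.List.pyRange 0 (f p) 1).flatMap (fun c => l.filter (fun q => f q == c))
          ++ p :: (l.filter (fun q => f q == f p)
          ++ (PySem.List.pyRange (f p + 1) N 1).flatMap (fun c => l.filter (fun q => f q == c))) := by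
      unfold pvByCode
      rw [hsplit, hsplit2, List.flatMap_append, List.flatMap_cons, hlow, hhigh, hmid]
      simp [List.cons_append]
    have hreassemble : pvByCode l f N
        = (PySem.List.pyRange 0 (f p) 1).flatMap (fun c => l.filter (fun q => f q == c))
          ++ (l.filter (fun q => f q == f p)
          ++ (PySem.List.pyRange (f p + 1) N 1).flatMap (fun c => l.filter (fun q => f q == c))) := by
      unfold pvByCode
      rw [hsplit, hsplit2, List.flatMap_append, List.flatMap_cons]
    rw [hshape]
    refine List.Perm.trans List.perm_middle ?_
    refine List.Perm.cons p ?_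
    rw [← hreassemble]
    exact ih (fun q hq => hb q (List.mem_cons_of_mem p hq))

theorem pv_getD_take (l : List (List Int × List Int)) (j ns : Int)
    (hj0 : 0 ≤ j) (hjn : j < ns) :
    PySem.List.pyGetD l j (([], []) : List Int × List Int)
      = PySem.List.pyGetD (l.take ns.toNat) j ([], []) := by
  rw [PySem.List.pyGetD_of_nonneg l ([], []) hj0,
    PySem.List.pyGetD_of_nonneg (l.take ns.toNat) ([], []) hj0]
  rw [List.getD, List.getD, List.getElem?_take, if_pos (by omega)]

-- A's None-seeded running max over a nonempty chunk is B's chunk[0]-seeded scan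
theorem pv_maxstep_eq (nj : Int) :
    ∀ (u : List (List Int × List Int)) (c0 : List Int × List Int),
      u.foldl (pvMaxStep nj) (some c0) = some (u.foldl (pvBestOf nj) c0) := by
  intro u
  induction u with
  | nil => intro c0; rfl
  | cons e u ih =>
    intro c0
    rw [List.foldl_cons, List.foldl_cons]
    have h : pvMaxStep nj (some c0) e = some (pvBestOf nj c0 e) := by
      simp only [pvMaxStep, pvBestOf]
      split_ifs <;> rfl
    rw [h, ih]

theorem pv_chunk_eq (nj ns : Int) :
    ∀ (n : Nat) (l : List (List Int × List Int)), l.length ≤ n → (ns ∣ (l.length : Int)) →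
      pvBestLoop l nj ns = pvChunkLoop l nj ns := by
  intro n
  induction n with
  | zero =>
    intro l hl _
    have h0 : l = [] := List.eq_nil_of_length_eq_zero (Nat.le_zero.mp hl)
    subst h0
    simp [pvBestLoop, pvChunkLoop]
  | succ n ih =>
    intro l hl hdvd
    by_cases hl0 : l = []
    · subst hl0; simp [pvBestLoop, pvChunkLoop]
    by_cases hns : ns ≤ 0
    · rw [pvBestLoop, pvChunkLoop, dif_neg hl0, dif_neg hl0, dif_pos hns, dif_pos hns]
    have hns' : (0:Int) < ns := by omega
    obtain ⟨k, hk⟩ := hdvd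
    have hlen0 : 0 < l.length := List.length_pos_of_ne_nil hl0
    have hk1 : 1 ≤ k := by nlinarith
    have hnsle' : ns ≤ (l.length : Int) := by nlinarith
    have hnsle : ns.toNat ≤ l.length := by omega
    have htake_len : PySem.List.len (l.take ns.toNat) = ns := by
      rw [PySem.List.len_eq, List.length_take]
      push_cast
      omega
    have htake_ne : l.take ns.toNat ≠ [] := by
      have hlt : (l.take ns.toNat).length = ns.toNat := by
        rw [List.length_take]; omega
      intro hc
      rw [hc] at hlt
      simp at hlt
      omega
    obtain ⟨c0, rest, hcr⟩ : ∃ c0 rest, l.take ns.toNat = c0 :: rest := by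
      cases hu : l.take ns.toNat with
      | nil => exact absurd hu htake_ne
      | cons a b => exact ⟨a, b, rfl⟩
    have hfold : (PySem.List.pyRange 0 ns 1).foldl
        (fun acc j => pvMaxStep nj acc (PySem.List.pyGetD l j ([], []))) none
        = some (rest.foldl (pvBestOf nj) c0) := by
      rw [PySem.List.foldl_congr_mem' _ _
        (fun acc j => pvMaxStep nj acc (PySem.List.pyGetD (l.take ns.toNat) j ([], []))) _
        (by
          intro j hj acc
          obtain ⟨hj0, hjn⟩ := PySem.List.mem_pyRange_one.mp hj
          rw [pv_getD_take l j ns hj0 hjn])]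
      rw [show PySem.List.pyRange 0 ns 1
            = PySem.List.pyRange 0 (PySem.List.len (l.take ns.toNat)) 1 by rw [htake_len]]
      rw [PySem.List.foldl_pyRange_pyGetD (l.take ns.toNat) ([], []) (pvMaxStep nj) none
        (le_refl 0)]
      rw [show ((0:Int).toNat) = 0 from rfl, List.drop_zero]
      rw [hcr, List.foldl_cons]
      show List.foldl _ (pvMaxStep nj none c0) rest = _
      rw [show pvMaxStep nj none c0 = some c0 from rfl, pv_maxstep_eq nj rest c0]
    have hdrop_len : ((l.drop ns.toNat).length : Int) = ns * (k - 1) := by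
      rw [List.length_drop, Nat.cast_sub hnsle, Int.toNat_of_nonneg (le_of_lt hns'), hk]
      ring
    have hrec : pvBestLoop (l.drop ns.toNat) nj ns = pvChunkLoop (l.drop ns.toNat) nj ns := by
      apply ih
      · rw [List.length_drop]; omega
      · exact ⟨k - 1, by rw [hdrop_len]⟩
    rw [pvBestLoop, pvChunkLoop, dif_neg hl0, dif_neg hl0, dif_neg hns, dif_neg hns]
    rw [PySem.List.slice_to l (le_of_lt hns'), PySem.List.slice_from l (le_of_lt hns')]
    rw [hfold, hcr, hrec]

theorem pv_foldl_nil_stays (nj ns : Int) (r : List Int) :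
    r.foldl (fun fn i => if i ≠ nj then tri_par_joueur fn i ns else fn) [] = [] := by
  induction r with
  | nil => rfl
  | cons i r ih =>
    rw [List.foldl_cons]
    by_cases h : i ≠ nj
    · rw [if_pos h, pv_tri_nil]; exact ih
    · rw [if_neg h]; exact ih

theorem pv_tri_nonpos (FN : List (List Int × List Int)) (i ns : Int) (hns : ns ≤ 0) :
    tri_par_joueur FN i ns = [] := by
  unfold tri_par_joueur
  rw [PySem.List.pyRange_one_eq_nil hns]
  rfl

theorem pv_fold_to_nil (nj ns : Int) (hns : ns ≤ 0) :
    ∀ (r : List Int) (FN : List (List Int × List Int)), (∃ i ∈ r, i ≠ nj) →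
      r.foldl (fun fn i => if i ≠ nj then tri_par_joueur fn i ns else fn) FN = [] := by
  intro r
  induction r with
  | nil => rintro FN ⟨i, hi, _⟩; cases hi
  | cons i r ih =>
    rintro FN ⟨j, hj, hjne⟩
    rw [List.foldl_cons]
    by_cases h : i ≠ nj
    · rw [if_pos h, pv_tri_nonpos FN i ns hns]
      exact pv_foldl_nil_stays nj ns r
    · rw [if_neg h]
      apply ih
      rcases List.mem_cons.mp hj with rfl | hmem
      · exact absurd hjne h
      · exact ⟨j, hmem, hjne⟩

-- the bucket dict of B, named so the let-bound body of the port can be talked about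
def pvDict (FN : List (List Int × List Int)) (nj np ns : Int) :
    PySem.Dict Int (List (List Int × List Int)) :=
  ((FN.filter (pvKeep nj np ns)).map (fun p => (pvCode (pvOthers nj np) ns p, p))).foldl
    (fun d q => d.modify q.1 [] (fun l => l ++ [q.2])) PySem.Dict.empty

theorem pv_alt_eq (FN : List (List Int × List Int)) (nj np ns : Int) :
    meilleur_reponse_alt FN nj np ns
      = pvChunkLoop ((PySem.List.sorted (pvDict FN nj np ns).keys (fun c => c) false).flatMap
          (fun c => (pvDict FN nj np ns).getD c [])) nj ns := rfl

theorem pv_chunkLoop_nil (nj ns : Int) : pvChunkLoop [] nj ns = [] := by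
  simp [pvChunkLoop]

theorem pv_bestLoop_nil (nj ns : Int) : pvBestLoop [] nj ns = [] := by
  simp [pvBestLoop]

theorem pv_alt_rows_nil (FN : List (List Int × List Int)) (nj np ns : Int)
    (h : FN.filter (pvKeep nj np ns) = []) : meilleur_reponse_alt FN nj np ns = [] := by
  rw [pv_alt_eq]
  have hd : pvDict FN nj np ns = PySem.Dict.empty := by
    unfold pvDict
    rw [h, List.map_nil, List.foldl_nil]
  rw [hd, PySem.Dict.keys_empty]
  exact pv_chunkLoop_nil nj ns

theorem pv_alt_main (FN : List (List Int × List Int)) (nj np ns : Int) (hns : 1 ≤ ns) :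
    meilleur_reponse_alt FN nj np ns
      = pvChunkLoop (pvByCode (FN.filter (pvKeep nj np ns)) (pvCode (pvOthers nj np) ns)
          (ns ^ (pvOthers nj np).length)) nj ns := by
  rw [pv_alt_eq]
  congr 1
  have hg : (fun c => (pvDict FN nj np ns).getD c [])
      = fun c => (FN.filter (pvKeep nj np ns)).filter
          (fun p => pvCode (pvOthers nj np) ns p == c) := by
    funext c
    exact pv_bucket_getD (FN.filter (pvKeep nj np ns)) (pvOthers nj np) ns c
  rw [hg]
  show _ = (PySem.List.pyRange 0 (ns ^ (pvOthers nj np).length) 1).flatMap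
      (fun c => (FN.filter (pvKeep nj np ns)).filter (fun p => pvCode (pvOthers nj np) ns p == c))
  apply pv_flatMap_eq_of_sorted
  · exact PySem.List.sorted_pairwise _ _
  · exact (PySem.List.pairwise_lt_pyRange_one _ _).imp le_of_lt
  · have hkn : (pvDict FN nj np ns).keys.Nodup := by
      unfold pvDict
      exact PySem.Dict.nodup_keys_foldl_modify_key _ _ _ _ _
        (by rw [PySem.Dict.keys_empty]; exact List.nodup_nil)
    exact ((PySem.List.sorted_perm _ _ _).nodup_iff).mpr hkn
  · exact PySem.List.nodup_pyRange_one _ _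
  · intro c hgc
    obtain ⟨p, hp, hpc⟩ : ∃ p ∈ FN.filter (pvKeep nj np ns),
        (pvCode (pvOthers nj np) ns p == c) = true := by
      by_contra hcon
      push Not at hcon
      exact hgc (List.filter_eq_nil_iff.mpr hcon)
    have hpc' : pvCode (pvOthers nj np) ns p = c := by simpa using hpc
    have hkeep : ((pvOthers nj np).all (fun i => pvInR ns i p)) = true :=
      (List.mem_filter.mp hp).2
    have hb := pv_code_bound ns hns p (pvOthers nj np) (pv_others_nonneg nj np) hkeep
    constructor
    · rw [(PySem.List.sorted_perm _ _ _).mem_iff,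
        show (pvDict FN nj np ns).keys
          = PySem.Set.ofList ((FN.filter (pvKeep nj np ns)).map
              (fun p => pvCode (pvOthers nj np) ns p))
          from pv_bucket_keys (FN.filter (pvKeep nj np ns)) (pvOthers nj np) ns,
        PySem.Set.mem_ofList]
      exact List.mem_map.mpr ⟨p, hp, hpc'⟩
    · exact PySem.List.mem_pyRange_one.mpr ⟨by omega, by omega⟩

-- ===== VERDICT (by name: the statement is the Claim_ definition above) =====
theorem meilleur_reponse_spec : Claim_equal_meilleur_reponse := by
  intro FN nj np ns hdom hpre
  unfold Spec_meilleur_reponse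
  obtain ⟨hle, hge⟩ := hpre
  by_cases h1ns : 1 ≤ ns
  · -- main path
    obtain ⟨_, _, hdvdB⟩ := hge h1ns
    have hdvd : ns ∣ ((FN.filter (pvKeep nj np ns)).length : Int) := by
      rwa [List.filter_congr (fun p _ => pv_keepB_eq nj np ns p)] at hdvdB
    have hb : ∀ p ∈ FN.filter (pvKeep nj np ns),
        0 ≤ pvCode (pvOthers nj np) ns p ∧
          pvCode (pvOthers nj np) ns p < ns ^ (pvOthers nj np).length :=
      fun p hp => pv_code_bound ns h1ns p (pvOthers nj np) (pv_others_nonneg nj np)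
        (List.mem_filter.mp hp).2
    have hAmain : aranger_le_jeu FN nj np ns
        = pvByCode (FN.filter (pvKeep nj np ns)) (pvCode (pvOthers nj np) ns)
            (ns ^ (pvOthers nj np).length) := by
      rw [pv_arranged_eq, pv_passes_byCode ns h1ns FN (pvOthers nj np) (pv_others_nonneg nj np)]
      rfl
    have hperm := pv_byCode_perm (pvCode (pvOthers nj np) ns)
      (ns ^ (pvOthers nj np).length) (FN.filter (pvKeep nj np ns)) hb
    have hdvd2 : ns ∣ ((pvByCode (FN.filter (pvKeep nj np ns)) (pvCode (pvOthers nj np) ns)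
        (ns ^ (pvOthers nj np).length)).length : Int) := by
      rw [hperm.length_eq]
      exact hdvd
    unfold meilleur_reponse
    rw [hAmain, pv_chunk_eq nj ns _ _ (le_refl _) hdvd2, pv_alt_main FN nj np ns h1ns]
  · -- ns ≤ 0: Pre_ gives another player or an empty table; both sides are []
    rcases hle (by omega) with hoth | hnil
    · obtain ⟨hnp1, hor⟩ := hoth
      obtain ⟨j, hj1, hjnp, hjne⟩ : ∃ j : Int, 1 ≤ j ∧ j ≤ np ∧ j ≠ nj := by
        by_cases hnj1 : nj = 1
        · exact ⟨2, by omega, by rcases hor with h | h <;> omega, by omega⟩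
        · exact ⟨1, le_refl 1, hnp1, fun hc => hnj1 hc.symm⟩
      have hjmem : j ∈ PySem.List.pyRange 1 (np + 1) 1 :=
        PySem.List.mem_pyRange_one.mpr ⟨hj1, by omega⟩
      have hA : meilleur_reponse FN nj np ns = [] := by
        unfold meilleur_reponse aranger_le_jeu
        rw [pv_fold_to_nil nj ns (by omega) _ FN ⟨j, hjmem, hjne⟩]
        exact pv_bestLoop_nil nj ns
      have hrows : FN.filter (pvKeep nj np ns) = [] := by
        apply List.filter_eq_nil_iff.mpr
        intro p _ hall
        have := (pv_keep_iff nj np ns p).mp hall j hj1 hjnp hjne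
        simp only [pvInR, decide_eq_true_eq] at this
        omega
      rw [hA, pv_alt_rows_nil FN nj np ns hrows]
    · subst hnil
      have hA : meilleur_reponse [] nj np ns = [] := by
        unfold meilleur_reponse aranger_le_jeu
        rw [pv_foldl_nil_stays nj ns _]
        exact pv_bestLoop_nil nj ns
      rw [hA, pv_alt_rows_nil [] nj np ns List.filter_nil]
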